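-- pv_equiv track=rewrite | github.com/proxman/exercices | compare_min.py | solution
-- ===== SOURCE A (Python) =====
-- def solution(A, B):
--     A.sort()
--     B.sort()
--     i = 0
--     for a in A:
--         if i < len(B) - 1 and B[i] < a:
--             i += 1
--         if a in B:
--             return a
--     return -1
-- ===== SOURCE B (Python) =====
-- def solution(A, B):
--     A.sort()
--     B.sort()
--     i = j = 0
--     while i < len(A) and j < len(B):
--         if A[i] == B[j]:
--             return A[i]
--         elif A[i] < B[j]:
--             i += 1
--         else:
--             j += 1
--     return -1
-- ===== Notes on version B (the rewrite author's own statement) =====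
-- stated objective: alternative
-- what changed: Replaced the per-element 'a in B' membership scan during the walk of sorted A with a two-pointer merge walk over the two sorted lists that locates the smallest common element by coordinated pointer advancement, with no membership test; the shared sorting remains, the scan structure does not.
import Mathlib
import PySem

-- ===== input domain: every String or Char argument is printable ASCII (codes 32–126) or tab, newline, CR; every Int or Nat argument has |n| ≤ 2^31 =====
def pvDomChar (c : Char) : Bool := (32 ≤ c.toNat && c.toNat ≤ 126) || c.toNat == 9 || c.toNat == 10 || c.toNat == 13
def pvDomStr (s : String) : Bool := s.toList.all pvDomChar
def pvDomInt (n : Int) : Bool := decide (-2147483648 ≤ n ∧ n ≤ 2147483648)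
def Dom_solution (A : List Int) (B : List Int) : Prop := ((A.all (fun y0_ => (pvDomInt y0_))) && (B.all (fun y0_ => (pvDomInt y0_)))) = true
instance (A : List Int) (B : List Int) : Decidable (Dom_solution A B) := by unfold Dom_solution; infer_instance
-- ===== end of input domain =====

-- B replaces A's per-element 'a in B' membership scan by a two-pointer merge walk over the
-- two sorted lists (alternative algorithm); both Pythons sort A and B in place, and the
-- equivalence proved here is about the return value.

-- ===== PORT A =====
-- the loop 'for a in A: if i < len(B)-1 and B[i] < a: i += 1; if a in B: return a'
def solLoopA : List Int → List Int → Int → Int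
  | [], _, _ => -1
  | a :: rest, Bs, i =>
      let i' : Int := if i < (Bs.length : Int) - 1 ∧ (PySem.List.pyGet? Bs i).getD 0 < a then i + 1 else i
      if a ∈ Bs then a else solLoopA rest Bs i'

def solution (A : List Int) (B : List Int) : Int :=
  solLoopA (PySem.List.sorted A (fun x => x) false) (PySem.List.sorted B (fun x => x) false) 0

-- ===== PORT B =====
-- the while-loop over indices i, j: each step drops the head of one list (pointer advance)
def mergeWalk : List Int → List Int → Int
  | a :: as, b :: bs =>
      if a = b then a
      else if a < b then mergeWalk as (b :: bs)
      else mergeWalk (a :: as) bs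
  | _, _ => -1
termination_by as bs => as.length + bs.length

def solution_alt (A : List Int) (B : List Int) : Int :=
  mergeWalk (PySem.List.sorted A (fun x => x) false) (PySem.List.sorted B (fun x => x) false)

-- ===== PRECONDITION & SPEC =====
def Spec_solution (A : List Int) (B : List Int) (out : Int) : Prop := out = solution_alt A B
instance (A : List Int) (B : List Int) (out : Int) : Decidable (Spec_solution A B out) := by unfold Spec_solution; infer_instance

-- ===== CLAIM (what is proved, stated in full; the proofs are below) =====
def Claim_equal_solution : Prop := ∀ (A : List Int) (B : List Int), Dom_solution A B → Spec_solution A B (solution A B)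

-- ===== LEMMAS AND PROOFS =====

-- first element of as present in bs, else -1 (common characterisation of both loops)
def firstIn (bs : List Int) : List Int → Int
  | [] => -1
  | a :: rest => if a ∈ bs then a else firstIn bs rest

theorem firstIn_nil : ∀ as : List Int, firstIn [] as = -1 := by
  intro as
  induction as with
  | nil => rfl
  | cons a rest ih => simpa [firstIn] using ih

-- A's loop counter i never influences the result
theorem solLoopA_eq_firstIn (as bs : List Int) : ∀ i, solLoopA as bs i = firstIn bs as := by
  induction as with
  | nil => intro i; rfl
  | cons a rest ih =>
      intro i
      simp only [solLoopA, firstIn]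
      split_ifs <;> simp [ih]

theorem firstIn_cons_of_forall_gt (b : Int) (bs : List Int) :
    ∀ as : List Int, (∀ x ∈ as, b < x) → firstIn (b :: bs) as = firstIn bs as := by
  intro as hgt
  induction as with
  | nil => rfl
  | cons a rest ih =>
      have hb : b < a := hgt a (by simp)
      have : (a ∈ b :: bs) ↔ (a ∈ bs) := by
        constructor
        · intro h
          rcases List.mem_cons.mp h with rfl | h'
          · exact absurd hb (lt_irrefl a)
          · exact h'
        · intro h
          exact List.mem_cons_of_mem _ h
      simp only [firstIn, this]
      split_ifs with h
      · rfl
      · exact ih (fun x hx => hgt x (List.mem_cons_of_mem _ hx))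

-- on sorted inputs the merge walk computes firstIn
theorem mergeWalk_eq_firstIn :
    ∀ n as bs, as.length + bs.length ≤ n →
      as.Pairwise (· ≤ ·) → bs.Pairwise (· ≤ ·) →
      mergeWalk as bs = firstIn bs as := by
  intro n
  induction n with
  | zero =>
      intro as bs hl _ _
      match as, bs with
      | [], [] => simp [mergeWalk, firstIn]
      | [], _ :: _ => simp at hl
      | _ :: _, _ => simp at hl
  | succ n ih =>
      intro as bs hl ha hb
      match as, bs with
      | [], bs => simp [mergeWalk, firstIn]
      | _ :: _, [] =>
          simp only [mergeWalk]
          rw [firstIn_nil]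
      | a :: as', b :: bs' =>
          simp only [mergeWalk]
          by_cases hab : a = b
          · simp [firstIn, hab]
          · simp only [if_neg hab]
            by_cases hlt : a < b
            · simp only [if_pos hlt]
              have hnotmem : a ∉ b :: bs' := by
                intro hmem
                rcases List.mem_cons.mp hmem with rfl | hmem'
                · exact hab rfl
                · have := (List.pairwise_cons.mp hb).1 a hmem'
                  exact absurd (lt_of_lt_of_le hlt this) (lt_irrefl a)
              rw [firstIn, if_neg hnotmem]
              exact ih as' (b :: bs') (by simp at hl ⊢; omega)
                (List.pairwise_cons.mp ha).2 hb
            · simp only [if_neg hlt]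
              have hba : b < a := lt_of_le_of_ne (le_of_not_gt hlt) (fun h => hab h.symm)
              have hgt : ∀ x ∈ a :: as', b < x := by
                intro x hx
                rcases List.mem_cons.mp hx with rfl | hx'
                · exact hba
                · exact lt_of_lt_of_le hba ((List.pairwise_cons.mp ha).1 x hx')
              rw [firstIn_cons_of_forall_gt b bs' (a :: as') hgt]
              have := ih (a :: as') bs' (by simp at hl ⊢; omega) ha
                (List.pairwise_cons.mp hb).2
              rw [this]

-- ===== VERDICT (by name: the statement is the Claim_ definition above) =====
theorem solution_spec : Claim_equal_solution := by
  intro A B _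
  unfold Spec_solution solution solution_alt
  rw [solLoopA_eq_firstIn,
      mergeWalk_eq_firstIn ((PySem.List.sorted A (fun x => x) false).length
          + (PySem.List.sorted B (fun x => x) false).length) _ _ le_rfl
        (PySem.List.sorted_pairwise A (fun x => x))
        (PySem.List.sorted_pairwise B (fun x => x))]
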